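-- pv_equiv track=rewrite | github.com/dp-web4/web4 | sessions/active/session210_sage_context_bleed_analysis.py | design_exercise_sequencing
-- ===== SOURCE A (Python) =====
-- from typing import List, Dict, Tuple, Optional
--
-- def design_exercise_sequencing(
--
--     exercises: List[Dict]
-- ) -> List[Dict]:
--     """
--     Reorder exercises to minimize context bleed risk.
--
--     Strategy from T011 observations:
--     - Put complex/engaging exercises LAST
--     - Start with simple, low-coherence tasks
--     - Interleave different types
--     """
--     # Classify exercises by "stickiness"
--     simple = []
--     moderate = []
--     complex = []
--
--     for ex in exercises:
--         if ex['type'] in ['repeat', 'count']: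
--             simple.append(ex)
--         elif ex['type'] in ['yesno', 'complete']:
--             moderate.append(ex)
--         else:  # Math, connect, remember
--             complex.append(ex)
--
--     # Sequence: simple → moderate → complex
--     sequenced = simple + moderate + complex
--
--     return sequenced
-- ===== SOURCE B (Python) =====
-- def _tier(ex):
--     t = ex['type']
--     if t in ('repeat', 'count'):
--         return 0
--     if t in ('yesno', 'complete'):
--         return 1
--     return 2
--
--
-- def design_exercise_sequencing(exercises):
--     # One stable sort by stickiness tier replaces the three buckets + concatenation.
--     return sorted(exercises, key=_tier)
-- ===== Notes on version B (the rewrite author's own statement) =====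
-- stated objective: simpler
-- what changed: Replaced the three classification lists and bucket concatenation with a single stable sort keyed by a 0/1/2 stickiness tier; stability preserves the per-bucket order.
import Mathlib
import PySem

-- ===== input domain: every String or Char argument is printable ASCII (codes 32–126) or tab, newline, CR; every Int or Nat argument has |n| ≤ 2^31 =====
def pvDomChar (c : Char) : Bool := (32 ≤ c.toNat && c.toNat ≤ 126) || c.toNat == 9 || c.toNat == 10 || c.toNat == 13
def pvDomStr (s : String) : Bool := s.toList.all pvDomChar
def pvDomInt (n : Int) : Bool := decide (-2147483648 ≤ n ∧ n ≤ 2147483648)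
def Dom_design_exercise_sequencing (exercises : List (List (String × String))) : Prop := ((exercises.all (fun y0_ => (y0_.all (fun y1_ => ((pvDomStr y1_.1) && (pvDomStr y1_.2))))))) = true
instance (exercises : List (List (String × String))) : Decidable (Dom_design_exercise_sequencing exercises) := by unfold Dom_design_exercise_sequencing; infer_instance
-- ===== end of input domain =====

-- B replaces A's three classification buckets + concatenation with one stable sort
-- keyed by a 0/1/2 stickiness tier (objective: simpler).


-- ===== PORT A =====
-- A's loop over exercises appending each ex to one of three buckets, then simple ++ moderate ++ complex.
-- ex['type'] is ported as Dict.getD ex "type" ""; Pre_ below restricts to inputs where the key is present.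
def design_exercise_sequencing (exercises : List (List (String × String))) : List (List (String × String)) :=
  let acc := exercises.foldl (fun acc ex =>
    let t := PySem.Dict.getD (PySem.Dict.mk ex) "type" ""
    if t == "repeat" || t == "count" then (acc.1 ++ [ex], acc.2.1, acc.2.2)
    else if t == "yesno" || t == "complete" then (acc.1, acc.2.1 ++ [ex], acc.2.2)
    else (acc.1, acc.2.1, acc.2.2 ++ [ex])) (([], [], []) : List (List (String × String)) × List (List (String × String)) × List (List (String × String)))
  acc.1 ++ acc.2.1 ++ acc.2.2

-- ===== PORT B =====
-- Source B's _tier key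
def pvTier (ex : List (String × String)) : Int :=
  let t := PySem.Dict.getD (PySem.Dict.mk ex) "type" ""
  if t == "repeat" || t == "count" then 0
  else if t == "yesno" || t == "complete" then 1
  else 2

def design_exercise_sequencing_alt (exercises : List (List (String × String))) : List (List (String × String)) :=
  PySem.List.sorted exercises pvTier

-- ===== PRECONDITION & SPEC =====
-- Pre_ excludes only inputs where some exercise lacks the 'type' key: there the Python A (and B) raise KeyError.
def Pre_design_exercise_sequencing (exercises : List (List (String × String))) : Prop :=
  (exercises.all (fun ex => PySem.Dict.contains (PySem.Dict.mk ex) "type")) = true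
instance (exercises : List (List (String × String))) : Decidable (Pre_design_exercise_sequencing exercises) := by unfold Pre_design_exercise_sequencing; infer_instance

def pvWitness_design_exercise_sequencing : (List (List (String × String))) :=
  [[("type", "math")], [("type", "repeat")], [("type", "yesno")], [("type", "count")]]

def Spec_design_exercise_sequencing (exercises : List (List (String × String))) (out : List (List (String × String))) : Prop := out = design_exercise_sequencing_alt exercises
instance (exercises : List (List (String × String))) (out : List (List (String × String))) : Decidable (Spec_design_exercise_sequencing exercises out) := by unfold Spec_design_exercise_sequencing; infer_instance

-- ===== CLAIM (what is proved, stated in full; the proofs are below) =====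
def Claim_equal_design_exercise_sequencing : Prop := ∀ (exercises : List (List (String × String))), Dom_design_exercise_sequencing exercises → Pre_design_exercise_sequencing exercises → Spec_design_exercise_sequencing exercises (design_exercise_sequencing exercises)

-- ===== LEMMAS AND PROOFS =====

-- Inserting x between the ≤-tier prefix and the >-tier suffix (stable insertion point).
theorem insertBy_mid (key : List (String × String) → Int) (x : List (String × String))
    (s c : List (List (String × String)))
    (hs : ∀ a ∈ s, ¬ key x < key a) (hc : ∀ a ∈ c, key x < key a) :
    PySem.List.insertBy (fun a b => decide (key a < key b)) x (s ++ c) = s ++ x :: c := by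
  induction s with
  | nil =>
    simp only [List.nil_append]
    cases c with
    | nil => simp [PySem.List.insertBy]
    | cons y ys =>
      simp only [PySem.List.insertBy]
      rw [if_pos]
      exact decide_eq_true (hc y (by simp))
  | cons a s ih =>
    simp only [List.cons_append, PySem.List.insertBy]
    rw [if_neg (by simpa using hs a (by simp))]
    rw [ih (fun b hb => hs b (by simp [hb]))]

-- Invariant: folding insertBy over xs starting from s ++ m ++ c (tiers 0,1,2) equals
-- A's bucket fold started at (s, m, c), concatenated.
theorem fold_invariant (xs : List (List (String × String)))
    (s m c : List (List (String × String)))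
    (hs : ∀ a ∈ s, pvTier a = 0) (hm : ∀ a ∈ m, pvTier a = 1) (hc : ∀ a ∈ c, pvTier a = 2) :
    xs.foldl (fun acc x => PySem.List.insertBy (fun a b => decide (pvTier a < pvTier b)) x acc) (s ++ m ++ c)
      = (xs.foldl (fun acc ex =>
          let t := PySem.Dict.getD (PySem.Dict.mk ex) "type" ""
          if t == "repeat" || t == "count" then (acc.1 ++ [ex], acc.2.1, acc.2.2)
          else if t == "yesno" || t == "complete" then (acc.1, acc.2.1 ++ [ex], acc.2.2)
          else (acc.1, acc.2.1, acc.2.2 ++ [ex])) (s, m, c)).1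
        ++ (xs.foldl (fun acc ex =>
          let t := PySem.Dict.getD (PySem.Dict.mk ex) "type" ""
          if t == "repeat" || t == "count" then (acc.1 ++ [ex], acc.2.1, acc.2.2)
          else if t == "yesno" || t == "complete" then (acc.1, acc.2.1 ++ [ex], acc.2.2)
          else (acc.1, acc.2.1, acc.2.2 ++ [ex])) (s, m, c)).2.1
        ++ (xs.foldl (fun acc ex =>
          let t := PySem.Dict.getD (PySem.Dict.mk ex) "type" ""
          if t == "repeat" || t == "count" then (acc.1 ++ [ex], acc.2.1, acc.2.2)
          else if t == "yesno" || t == "complete" then (acc.1, acc.2.1 ++ [ex], acc.2.2)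
          else (acc.1, acc.2.1, acc.2.2 ++ [ex])) (s, m, c)).2.2 := by
  induction xs generalizing s m c with
  | nil => simp
  | cons x xs ih =>
    simp only [List.foldl_cons]
    by_cases h0 : (PySem.Dict.getD (PySem.Dict.mk x) "type" "" == "repeat" || PySem.Dict.getD (PySem.Dict.mk x) "type" "" == "count") = true
    · have hx : pvTier x = 0 := by simp [pvTier, h0]
      rw [show s ++ m ++ c = s ++ (m ++ c) by simp,
          insertBy_mid pvTier x s (m ++ c)
            (fun a ha => by simp [hx, hs a ha])
            (fun a ha => by
              rcases List.mem_append.1 ha with h | h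
              · simp [hx, hm a h]
              · simp [hx, hc a h]),
          show s ++ x :: (m ++ c) = (s ++ [x]) ++ m ++ c by simp]
      simp only [h0, if_pos]
      exact ih (s ++ [x]) m c
        (fun a ha => by rcases List.mem_append.1 ha with h | h
                        · exact hs a h
                        · simp at h; subst h; exact hx) hm hc
    · by_cases h1 : (PySem.Dict.getD (PySem.Dict.mk x) "type" "" == "yesno" || PySem.Dict.getD (PySem.Dict.mk x) "type" "" == "complete") = true
      · have hx : pvTier x = 1 := by simp [pvTier, h0, h1]
        rw [show s ++ m ++ c = (s ++ m) ++ c by simp,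
            insertBy_mid pvTier x (s ++ m) c
              (fun a ha => by
                rcases List.mem_append.1 ha with h | h
                · simp [hx, hs a h]
                · simp [hx, hm a h])
              (fun a ha => by simp [hx, hc a ha]),
            show (s ++ m) ++ x :: c = s ++ (m ++ [x]) ++ c by simp]
        simp only [h0, h1, if_pos, if_neg, Bool.false_eq_true, not_false_eq_true]
        exact ih s (m ++ [x]) c hs
          (fun a ha => by rcases List.mem_append.1 ha with h | h
                          · exact hm a h
                          · simp at h; subst h; exact hx) hc
      · have hx : pvTier x = 2 := by simp [pvTier, h0, h1]
        rw [PySem.List.insertBy_of_forall_not_before _ x (s ++ m ++ c)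
              (fun a ha => by
                rcases List.mem_append.1 ha with h | h
                · rcases List.mem_append.1 h with h' | h'
                  · simp [hx, hs a h']
                  · simp [hx, hm a h']
                · simp [hx, hc a h]),
            show (s ++ m ++ c) ++ [x] = s ++ m ++ (c ++ [x]) by simp]
        simp only [h0, h1, if_neg, Bool.false_eq_true, not_false_eq_true]
        exact ih s m (c ++ [x]) hs hm
          (fun a ha => by rcases List.mem_append.1 ha with h | h
                          · exact hc a h
                          · simp at h; subst h; exact hx)

-- ===== VERDICT (by name: the statement is the Claim_ definition above) =====
theorem design_exercise_sequencing_spec : Claim_equal_design_exercise_sequencing := by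
  intro exercises _ _
  show design_exercise_sequencing exercises = design_exercise_sequencing_alt exercises
  rw [design_exercise_sequencing_alt, PySem.List.sorted_eq_foldl_insertBy]
  have h := fold_invariant exercises [] [] [] (by simp) (by simp) (by simp)
  simpa [design_exercise_sequencing] using h.symm
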